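-- pv_equiv track=rewrite | github.com/Sanher/Agent_runner | agents/email_agent/service.py | _build_from_criteria
-- ===== SOURCE A (Python) =====
-- from typing import Any, Dict, List, Optional
--
-- def _build_from_criteria(whitelist: List[str]) -> List[str]:
--     if not whitelist:
--         return []
--     if len(whitelist) == 1:
--         return ["FROM", f'"{whitelist[0]}"']
--
--     # IMAP OR is binary: OR A B. Chain expressions to support N senders.
--     tokens: List[str] = ["OR", "FROM", f'"{whitelist[0]}"', "FROM", f'"{whitelist[1]}"']
--     for sender in whitelist[2:]:
--         tokens = ["OR", *tokens, "FROM", f'"{sender}"']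
--     return tokens
-- ===== SOURCE B (Python) =====
-- from typing import List
--
-- def _build_from_criteria(whitelist: List[str]) -> List[str]:
--     if not whitelist:
--         return []
--     # (n-1) leading "OR" tokens, then all FROM/"sender" pairs in order.
--     tokens: List[str] = ["OR"] * (len(whitelist) - 1)
--     for sender in whitelist:
--         tokens += ["FROM", f'"{sender}"']
--     return tokens
-- ===== Notes on version B (the rewrite author's own statement) =====
-- stated objective: faster
-- what changed: Replaces the loop that rebuilds the whole token list on every iteration (tokens = ["OR", *tokens, ...]) with a closed form: emit (n-1) "OR" tokens once, then append each FROM/"sender" pair in a single pass.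
import Mathlib
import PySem

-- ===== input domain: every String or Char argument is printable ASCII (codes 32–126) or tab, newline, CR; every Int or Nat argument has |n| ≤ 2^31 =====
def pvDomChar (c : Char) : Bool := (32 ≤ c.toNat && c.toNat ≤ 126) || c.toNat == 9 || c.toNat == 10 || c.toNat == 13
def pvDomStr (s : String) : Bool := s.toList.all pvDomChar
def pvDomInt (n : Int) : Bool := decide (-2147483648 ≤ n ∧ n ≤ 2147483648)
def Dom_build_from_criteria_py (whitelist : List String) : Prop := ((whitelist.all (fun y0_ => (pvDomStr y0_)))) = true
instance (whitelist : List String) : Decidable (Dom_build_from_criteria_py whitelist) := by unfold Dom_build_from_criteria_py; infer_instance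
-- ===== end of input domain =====

-- ===== PORT A =====
-- Port of A: the loop `tokens = ["OR", *tokens, "FROM", f'"{sender}"']` is a foldl over whitelist[2:].
def build_from_criteria_py (whitelist : List String) : List String :=
  match whitelist with
  | [] => []
  | [s] => ["FROM", "\"" ++ s ++ "\""]
  | a :: b :: rest =>
    rest.foldl (fun tokens sender => "OR" :: tokens ++ ["FROM", "\"" ++ sender ++ "\""])
      ["OR", "FROM", "\"" ++ a ++ "\"", "FROM", "\"" ++ b ++ "\""]

-- ===== PORT B =====
-- Port of B: (n-1) "OR" tokens, then one FROM/"sender" pair per sender (the += loop is a flatMap).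
def build_from_criteria_py_alt (whitelist : List String) : List String :=
  if whitelist = [] then []
  else
    List.replicate (whitelist.length - 1) "OR"
      ++ whitelist.flatMap (fun sender => ["FROM", "\"" ++ sender ++ "\""])

-- ===== PRECONDITION & SPEC =====
def Spec_build_from_criteria_py (whitelist : List String) (out : List String) : Prop := out = build_from_criteria_py_alt whitelist
instance (whitelist : List String) (out : List String) : Decidable (Spec_build_from_criteria_py whitelist out) := by unfold Spec_build_from_criteria_py; infer_instance

-- ===== CLAIM (what is proved, stated in full; the proofs are below) =====
def Claim_equal_build_from_criteria_py : Prop := ∀ (whitelist : List String), Dom_build_from_criteria_py whitelist → Spec_build_from_criteria_py whitelist (build_from_criteria_py whitelist)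

-- ===== LEMMAS AND PROOFS =====

-- ===== VERDICT (by name: the statement is the Claim_ definition above) =====
lemma foldl_or_chain (rest : List String) (t : List String) :
    rest.foldl (fun tokens sender => "OR" :: tokens ++ ["FROM", "\"" ++ sender ++ "\""]) t
      = List.replicate rest.length "OR" ++ t
          ++ rest.flatMap (fun sender => ["FROM", "\"" ++ sender ++ "\""]) := by
  induction rest generalizing t with
  | nil => simp
  | cons s rs ih =>
    simp only [List.foldl_cons, ih, List.flatMap_cons, List.length_cons,
      List.replicate_succ']
    simp

theorem build_from_criteria_py_spec : Claim_equal_build_from_criteria_py := by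
  intro wl _
  unfold Spec_build_from_criteria_py
  cases wl with
  | nil => rfl
  | cons a t =>
    cases t with
    | nil => rfl
    | cons b rest =>
      simp only [build_from_criteria_py, build_from_criteria_py_alt]
      rw [foldl_or_chain]
      simp [List.replicate_succ']
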